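-- pv_equiv track=rewrite | github.com/AlexanderCardarasUCI/SearchEngine | Tokenizer/Tokenize.py | compute_token_analytics
-- ===== SOURCE A (Python) =====
-- def compute_token_analytics(my_tokens):
--
--     frequencies = {}
--     positions = {}
--
--     for index, token in enumerate(my_tokens):
--         # Frequencies
--         if token in frequencies:
--             frequencies[token] += 1
--         else:
--             frequencies[token] = 1
--
--         # Positions
--         if token in positions:
--             positions[token].append(index)
--         else:
--             positions[token] = [index]
--
--     return frequencies, positions
-- ===== SOURCE B (Python) =====
-- def compute_token_analytics(my_tokens):
--     seen = dict.fromkeys(my_tokens)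
--     frequencies = {t: my_tokens.count(t) for t in seen}
--     positions = {t: [i for i, x in enumerate(my_tokens) if x == t] for t in seen}
--     return frequencies, positions
-- ===== Notes on version B (the rewrite author's own statement) =====
-- stated objective: alternative
-- what changed: B builds no dict during the scan: it first collects the distinct tokens in first-occurrence order via dict.fromkeys, then derives each token's frequency with list.count and its position list with a per-token enumerate filter, trading A's single incremental two-dict pass for staged per-token scans.
import Mathlib
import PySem

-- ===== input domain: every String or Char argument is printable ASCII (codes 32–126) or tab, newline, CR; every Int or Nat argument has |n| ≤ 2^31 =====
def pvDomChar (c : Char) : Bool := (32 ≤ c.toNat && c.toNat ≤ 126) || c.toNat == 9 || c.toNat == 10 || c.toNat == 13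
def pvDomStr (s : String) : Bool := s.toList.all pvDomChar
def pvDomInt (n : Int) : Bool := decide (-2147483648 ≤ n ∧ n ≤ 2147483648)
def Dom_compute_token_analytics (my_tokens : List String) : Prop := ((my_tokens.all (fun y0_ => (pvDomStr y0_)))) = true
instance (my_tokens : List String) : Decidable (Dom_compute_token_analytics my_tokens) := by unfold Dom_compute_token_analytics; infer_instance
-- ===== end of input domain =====

-- B replaces A's incremental two-dict pass by staged scans: distinct tokens first
-- (dict.fromkeys), then frequency via list.count and positions via a per-token
-- enumerate filter (objective: alternative, not faster on large inputs).


-- ===== PORT A =====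
-- A's loop body, frequencies half: if token in frequencies: +=1 else =1
def pvStepF (d : PySem.Dict String Int) (pr : Int × String) : PySem.Dict String Int :=
  if d.contains pr.2 then d.insert pr.2 (d.getD pr.2 0 + 1) else d.insert pr.2 1

-- A's loop body, positions half: if token in positions: append(index) else =[index]
def pvStepP (d : PySem.Dict String (List Int)) (pr : Int × String) : PySem.Dict String (List Int) :=
  if d.contains pr.2 then d.insert pr.2 (d.getD pr.2 [] ++ [pr.1]) else d.insert pr.2 [pr.1]

def pvStepA (st : PySem.Dict String Int × PySem.Dict String (List Int)) (pr : Int × String) :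
    PySem.Dict String Int × PySem.Dict String (List Int) :=
  (pvStepF st.1 pr, pvStepP st.2 pr)

def compute_token_analytics (my_tokens : List String) :
    (List (String × Int)) × (List (String × List Int)) :=
  let st := (PySem.List.enumerate my_tokens).foldl pvStepA (PySem.Dict.empty, PySem.Dict.empty)
  (st.1.items, st.2.items)

-- ===== PORT B =====
def compute_token_analytics_alt (my_tokens : List String) :
    (List (String × Int)) × (List (String × List Int)) :=
  let seen := PySem.List.dedup my_tokens        -- dict.fromkeys(my_tokens)
  let frequencies := seen.map (fun t => (t, (PySem.List.count my_tokens t : Int)))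
  let positions := seen.map
    (fun t => (t, ((PySem.List.enumerate my_tokens).filter (fun p => p.2 == t)).map (fun p => p.1)))
  (frequencies, positions)

-- ===== PRECONDITION & SPEC =====
def Spec_compute_token_analytics (my_tokens : List String) (out : (List (String × Int)) × (List (String × List Int))) : Prop := out = compute_token_analytics_alt my_tokens
instance (my_tokens : List String) (out : (List (String × Int)) × (List (String × List Int))) : Decidable (Spec_compute_token_analytics my_tokens out) := by unfold Spec_compute_token_analytics; infer_instance

-- ===== CLAIM (what is proved, stated in full; the proofs are below) =====
def Claim_equal_compute_token_analytics : Prop := ∀ (my_tokens : List String), Dom_compute_token_analytics my_tokens → Spec_compute_token_analytics my_tokens (compute_token_analytics my_tokens)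

-- ===== LEMMAS AND PROOFS =====

-- the pair fold splits into the two independent component folds
lemma foldA_split (l : List (Int × String)) (a : PySem.Dict String Int)
    (b : PySem.Dict String (List Int)) :
    l.foldl pvStepA (a, b) = (l.foldl pvStepF a, l.foldl pvStepP b) := by
  induction l generalizing a b with
  | nil => rfl
  | cons pr l ih => exact ih _ _

-- both branches of A's frequency step write getD + 1
lemma stepF_eq (d : PySem.Dict String Int) (pr : Int × String) :
    pvStepF d pr = d.insert pr.2 (d.getD pr.2 0 + 1) := by
  unfold pvStepF
  by_cases h : d.contains pr.2
  · simp [h]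
  · rw [if_neg h, PySem.Dict.getD_of_not_contains d 0 (by simpa using h)]; norm_num

-- A's frequency fold is Counter(my_tokens)
lemma freq_fold (my_tokens : List String) :
    (PySem.List.enumerate my_tokens).foldl pvStepF PySem.Dict.empty
      = PySem.Dict.counter my_tokens := by
  have hstep : pvStepF = fun (d : PySem.Dict String Int) (pr : Int × String) =>
      d.insert pr.2 (d.getD pr.2 0 + 1) := funext fun d => funext fun pr => stepF_eq d pr
  rw [hstep]
  conv_rhs => rw [← PySem.Dict.foldl_insert_getD_add_one_eq_counter,
    ← PySem.List.map_snd_enumerate my_tokens 0, List.foldl_map]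

-- keys of a dict whose items are a map tagging each element of ks
lemma keys_of_items_map (d : PySem.Dict String (List Int)) (ks : List String)
    (f : String → List Int) (h : d.items = ks.map (fun t => (t, f t))) : d.keys = ks := by
  simp only [PySem.Dict.keys, h, List.map_map]
  simp [Function.comp_def]

-- A's positions fold, characterised over an arbitrary pair list
lemma pos_fold (l : List (Int × String)) :
    (l.foldl pvStepP PySem.Dict.empty).items
      = (PySem.Set.ofList (l.map (·.2))).map
          (fun t => (t, (l.filter (fun p => p.2 == t)).map (fun p => p.1))) := by
  induction l using List.reverseRecOn with
  | nil => rfl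
  | append_singleton l pr ih =>
    rw [List.foldl_append, List.foldl_cons, List.foldl_nil, List.map_append, List.map_cons,
      List.map_nil, PySem.Set.ofList_append_singleton]
    set d := l.foldl pvStepP PySem.Dict.empty with hd
    have hkeys : d.keys = PySem.Set.ofList (l.map (·.2)) :=
      keys_of_items_map _ _ _ ih
    have hnd : d.keys.Nodup := by
      rw [hkeys]; exact PySem.Set.nodup_ofList _
    have hc : d.contains pr.2
        = decide (pr.2 ∈ PySem.Set.ofList (l.map (·.2))) := by
      rw [PySem.Dict.contains_eq_decide_mem_keys, hkeys]
    by_cases hm : pr.2 ∈ l.map (·.2)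
    · -- token seen before: in-place update of the existing entry
      have hms : pr.2 ∈ PySem.Set.ofList (l.map (·.2)) := (PySem.Set.mem_ofList _ _).mpr hm
      have hcontains : d.contains pr.2 := by
        rw [hc]; exact decide_eq_true hms
      have hmemit : (pr.2, (l.filter (fun p => p.2 == pr.2)).map (fun p => p.1))
          ∈ d.items := by
        rw [ih]; exact List.mem_map_of_mem hms
      have hgd : d.getD pr.2 []
          = (l.filter (fun p => p.2 == pr.2)).map (fun p => p.1) :=
        PySem.Dict.getD_of_mem_items _ hmemit hnd []
      unfold pvStepP
      rw [if_pos hcontains, PySem.Dict.items_insert_of_contains _ _ hcontains, ih,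
        PySem.Set.add_of_mem hms, List.map_map]
      apply List.map_congr_left
      intro t _
      by_cases ht : t = pr.2
      · subst ht
        simp [hgd, List.filter_append]
      · have ht' : (t == pr.2) = false := by simpa using ht
        have ht'' : (pr.2 == t) = false := by simpa using (Ne.symm ht)
        simp [Function.comp, ht', List.filter_append, ht'']
    · -- fresh token: a new entry is appended
      have hms : pr.2 ∉ PySem.Set.ofList (l.map (·.2)) := fun h =>
        hm ((PySem.Set.mem_ofList _ _).mp h)
      have hcontains : d.contains pr.2 = false := by
        rw [hc]; exact decide_eq_false hms
      have hfil : l.filter (fun p => p.2 == pr.2) = [] := by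
        rw [List.filter_eq_nil_iff]
        intro p hp hbe
        exact hm (List.mem_map.mpr ⟨p, hp, by simpa using hbe⟩)
      unfold pvStepP
      rw [if_neg (by simp [hcontains]), PySem.Dict.items_insert_of_not_contains _ _ hcontains, ih,
        PySem.Set.add_of_not_mem hms, List.map_append, List.map_cons, List.map_nil]
      congr 1
      · apply List.map_congr_left
        intro t htm
        have ht : t ≠ pr.2 := fun h => hms (h ▸ htm)
        have ht'' : (pr.2 == t) = false := by simpa using (Ne.symm ht)
        simp [List.filter_append, ht'']
      · simp [List.filter_append, hfil]

-- ===== VERDICT (by name: the statement is the Claim_ definition above) =====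
theorem compute_token_analytics_spec : Claim_equal_compute_token_analytics := by
  intro my_tokens _
  unfold Spec_compute_token_analytics compute_token_analytics compute_token_analytics_alt
  simp only [foldA_split, freq_fold]
  refine Prod.ext ?_ ?_
  · simp [PySem.Dict.items_counter, PySem.List.count_eq]
  · simp [pos_fold, PySem.List.map_snd_enumerate]
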